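-- pv_equiv track=rewrite | github.com/DevOpsMadDog/Fixops | fixops-blended-enterprise/src/services/business_context_processor.py | _analyze_safety_impact
-- ===== SOURCE A (Python) =====
-- from typing import Dict, Any, Optional, List
--
-- def _analyze_safety_impact(threats: List[Dict], project: Dict) -> str:
--     """Determine safety impact from OTM threat analysis"""
--     # Check project type for safety implications
--     project_type = project.get("type", "").lower()
--     if any(keyword in project_type for keyword in ["medical", "automotive", "industrial", "critical"]):
--         return "hazardous"
--
--     # Analyze threat severity
--     critical_threats = [t for t in threats if t.get("severity", "").upper() == "CRITICAL"]
--     if critical_threats: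
--         return "major"
--
--     high_threats = [t for t in threats if t.get("severity", "").upper() == "HIGH"]
--     if high_threats:
--         return "marginal"
--
--     return "negligible"
-- ===== SOURCE B (Python) =====
-- def _analyze_safety_impact(threats, project):
--     """Determine safety impact from OTM threat analysis (single early-exit pass)."""
--     project_type = project.get("type", "").lower()
--     for keyword in ("medical", "automotive", "industrial", "critical"):
--         if keyword in project_type:
--             return "hazardous"
--     saw_high = False
--     for t in threats:
--         sev = t.get("severity", "").upper()
--         if sev == "CRITICAL":
--             return "major"
--         if sev == "HIGH":
--             saw_high = True
--     return "marginal" if saw_high else "negligible"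
-- ===== Notes on version B (the rewrite author's own statement) =====
-- stated objective: simpler
-- what changed: Replaced the two full list-comprehension scans over threats with one early-exiting pass that returns 'major' at the first CRITICAL and records whether any HIGH was seen.
import Mathlib
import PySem

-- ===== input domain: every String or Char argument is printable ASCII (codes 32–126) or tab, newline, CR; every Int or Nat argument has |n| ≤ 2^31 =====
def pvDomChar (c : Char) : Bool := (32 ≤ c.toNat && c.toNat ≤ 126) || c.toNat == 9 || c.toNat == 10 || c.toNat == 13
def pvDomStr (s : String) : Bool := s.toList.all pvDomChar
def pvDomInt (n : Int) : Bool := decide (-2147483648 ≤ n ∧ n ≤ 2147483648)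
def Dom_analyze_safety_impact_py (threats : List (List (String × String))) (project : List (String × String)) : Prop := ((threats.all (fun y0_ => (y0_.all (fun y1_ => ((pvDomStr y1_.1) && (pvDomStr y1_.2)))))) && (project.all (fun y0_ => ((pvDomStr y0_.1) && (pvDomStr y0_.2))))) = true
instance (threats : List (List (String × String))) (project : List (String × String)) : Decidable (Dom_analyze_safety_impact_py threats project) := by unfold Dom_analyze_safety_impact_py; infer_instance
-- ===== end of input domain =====

-- B replaces A's two full filter passes over `threats` with one early-exiting pass (objective: simpler).

-- ===== PORT A =====
def analyze_safety_impact_py (threats : List (List (String × String))) (project : List (String × String)) : String :=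
  let project_type := PySem.Str.lower ((PySem.Dict.mk project).getD "type" "")
  if ["medical", "automotive", "industrial", "critical"].any
      (fun keyword => PySem.Str.isIn keyword project_type) then
    "hazardous"
  else
    let critical_threats := threats.filter
      (fun t => PySem.Str.upper ((PySem.Dict.mk t).getD "severity" "") == "CRITICAL")
    if !critical_threats.isEmpty then
      "major"
    else
      let high_threats := threats.filter
        (fun t => PySem.Str.upper ((PySem.Dict.mk t).getD "severity" "") == "HIGH")
      if !high_threats.isEmpty then
        "marginal"
      else
        "negligible"

-- ===== PORT B =====
-- single early-exiting pass: return "major" at the first CRITICAL, remember whether a HIGH was seen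
def altScan (threats : List (List (String × String))) (sawHigh : Bool) : String :=
  match threats with
  | [] => if sawHigh then "marginal" else "negligible"
  | t :: rest =>
    let sev := PySem.Str.upper ((PySem.Dict.mk t).getD "severity" "")
    if sev == "CRITICAL" then "major"
    else altScan rest (sawHigh || sev == "HIGH")

def analyze_safety_impact_py_alt (threats : List (List (String × String))) (project : List (String × String)) : String :=
  let project_type := PySem.Str.lower ((PySem.Dict.mk project).getD "type" "")
  if ["medical", "automotive", "industrial", "critical"].any
      (fun keyword => PySem.Str.isIn keyword project_type) then
    "hazardous"
  else
    altScan threats false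

-- ===== PRECONDITION & SPEC =====
def Spec_analyze_safety_impact_py (threats : List (List (String × String))) (project : List (String × String)) (out : String) : Prop := out = analyze_safety_impact_py_alt threats project
instance (threats : List (List (String × String))) (project : List (String × String)) (out : String) : Decidable (Spec_analyze_safety_impact_py threats project out) := by unfold Spec_analyze_safety_impact_py; infer_instance

-- ===== CLAIM (what is proved, stated in full; the proofs are below) =====
def Claim_equal_analyze_safety_impact_py : Prop := ∀ (threats : List (List (String × String))) (project : List (String × String)), Dom_analyze_safety_impact_py threats project → Spec_analyze_safety_impact_py threats project (analyze_safety_impact_py threats project)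

-- ===== LEMMAS AND PROOFS =====

lemma altScan_eq (threats : List (List (String × String))) (sawHigh : Bool) :
    altScan threats sawHigh =
      if !(threats.filter
            (fun t => PySem.Str.upper ((PySem.Dict.mk t).getD "severity" "") == "CRITICAL")).isEmpty then
        "major"
      else if sawHigh || !(threats.filter
            (fun t => PySem.Str.upper ((PySem.Dict.mk t).getD "severity" "") == "HIGH")).isEmpty then
        "marginal"
      else
        "negligible" := by
  induction threats generalizing sawHigh with
  | nil => cases sawHigh <;> simp [altScan]
  | cons t rest ih =>
    simp only [altScan, List.filter_cons]
    by_cases hc : PySem.Str.upper ((PySem.Dict.mk t).getD "severity" "") == "CRITICAL"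
    · simp [hc]
    · simp only [hc, ih]
      by_cases hh : PySem.Str.upper ((PySem.Dict.mk t).getD "severity" "") == "HIGH" <;>
        cases sawHigh <;> simp [hh]

-- ===== VERDICT (by name: the statement is the Claim_ definition above) =====
theorem analyze_safety_impact_py_spec : Claim_equal_analyze_safety_impact_py := by
  intro threats project _
  unfold Spec_analyze_safety_impact_py analyze_safety_impact_py analyze_safety_impact_py_alt
  simp only [altScan_eq, Bool.false_or]
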